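-- pv_equiv track=rewrite | github.com/ArciAndres/ChineseWordSegmentation | resources/RebuildHelper.py | rebuild_sentences_from_bies
-- ===== SOURCE A (Python) =====
-- def rebuild_sentences_from_bies(ybies, sents_cut_max, cuts_in_sents):
--     number_of_parts = [len(x) for x in sents_cut_max]
--     sents_rebuild = []
--     accum = 0
--     for v in number_of_parts:
--         sents_rebuild.append(''.join(ybies[accum:accum+v]))
--         accum += v
--     result = rebuild_sentences(sents_rebuild, cuts_in_sents)
--     return result
--
-- def rebuild_sentences(sents_to_rebuild, cuts_in_sents):
--     sents_rebuilt = []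
--     accum=0
--     cuts_per_line = [len(x) for x in cuts_in_sents]
--     for i, cuts_num in enumerate(cuts_per_line):
--         sent_reb = []
--         if cuts_num == 0:
--             sent_reb = sents_to_rebuild[accum]
--             accum += 1
--         else:
--             for j in range(cuts_num):
--                 sent_reb.append(sents_to_rebuild[accum+j])
--             sent_reb = "".join(sent_reb)
--             accum += cuts_num
--         sents_rebuilt.append(sent_reb)
--
--     return sents_rebuilt
-- ===== SOURCE B (Python) =====
-- def rebuild_sentences_from_bies(ybies, sents_cut_max, cuts_in_sents):
--     # Fused single pass: slice ybies directly per output line, no intermediate list.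
--     chunk_lens = [len(c) for c in sents_cut_max]
--     out = []
--     chunk_idx = pos = 0
--     for cuts in cuts_in_sents:
--         n = len(cuts) or 1
--         width = 0
--         for k in range(n):
--             width += chunk_lens[chunk_idx + k]
--         out.append(''.join(ybies[pos:pos + width]))
--         chunk_idx += n
--         pos += width
--     return out
-- ===== Notes on version B (the rewrite author's own statement) =====
-- stated objective: simpler
-- what changed: Fuses A's two passes (build intermediate joined chunk strings, then regroup and re-join them) into one pass that slices ybies directly per output line using a chunk-index and a token-offset accumulator, eliminating the intermediate sents_rebuild list and the helper function.
import Mathlib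
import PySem

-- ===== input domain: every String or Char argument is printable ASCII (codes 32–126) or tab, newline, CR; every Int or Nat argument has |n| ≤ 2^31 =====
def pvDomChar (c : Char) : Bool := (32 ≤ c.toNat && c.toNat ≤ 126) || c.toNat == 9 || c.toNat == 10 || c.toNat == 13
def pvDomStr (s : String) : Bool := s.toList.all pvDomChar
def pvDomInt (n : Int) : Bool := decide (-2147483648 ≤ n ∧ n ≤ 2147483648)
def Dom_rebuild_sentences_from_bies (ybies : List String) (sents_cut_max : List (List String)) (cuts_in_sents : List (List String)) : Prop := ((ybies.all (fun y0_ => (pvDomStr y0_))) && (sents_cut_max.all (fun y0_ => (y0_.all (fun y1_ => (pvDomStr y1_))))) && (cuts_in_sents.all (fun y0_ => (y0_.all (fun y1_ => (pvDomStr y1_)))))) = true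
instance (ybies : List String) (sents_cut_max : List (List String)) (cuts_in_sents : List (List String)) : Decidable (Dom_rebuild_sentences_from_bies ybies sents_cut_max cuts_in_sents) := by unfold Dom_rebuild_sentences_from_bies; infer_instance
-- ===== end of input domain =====

-- B fuses A's two passes (build intermediate joined chunk strings, then regroup and
-- re-join them) into one slice-and-join pass over ybies with two accumulators;
-- same cost, simpler structure. Both raise IndexError (excluded by Pre_) when
-- cuts_in_sents demands more chunks than sents_cut_max provides.

-- ===== PORT A =====
-- the first loop of A: for v in number_of_parts: append ''.join(ybies[accum:accum+v]); accum += v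
def pvBuild (ybies : List String) (lens : List Nat) (accum : Nat) : List String :=
  match lens with
  | [] => []
  | v :: rest =>
      PySem.Str.join "" (PySem.List.slice ybies (some (accum : Int)) (some ((accum : Int) + (v : Int))))
        :: pvBuild ybies rest (accum + v)

-- the inner loop of rebuild_sentences: for j in range(cuts_num): sent_reb.append(sents_to_rebuild[accum+j])
def pvInner (sents : List String) (accum n : Nat) : List String :=
  (List.range n).map (fun j => (PySem.List.pyGet? sents ((accum + j : Nat) : Int)).getD "")

-- the loop of rebuild_sentences (getD "" is reached only where Python raises IndexError)
def pvRegroup (sents : List String) (cuts : List (List String)) (accum : Nat) : List String :=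
  match cuts with
  | [] => []
  | c :: rest =>
      if c.length = 0 then
        (PySem.List.pyGet? sents ((accum : Nat) : Int)).getD "" :: pvRegroup sents rest (accum + 1)
      else
        PySem.Str.join "" (pvInner sents accum c.length) :: pvRegroup sents rest (accum + c.length)

def rebuild_sentences_from_bies (ybies : List String) (sents_cut_max : List (List String)) (cuts_in_sents : List (List String)) : List String :=
  pvRegroup (pvBuild ybies (sents_cut_max.map List.length) 0) cuts_in_sents 0

-- ===== PORT B =====
-- B's inner loop: for k in range(n): width += chunk_lens[chunk_idx + k]
-- (getD 0 is reached only where Python raises IndexError)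
def pvWidth (chunkLens : List Nat) (chunkIdx n : Nat) : Nat :=
  (List.range n).foldl (fun w k => w + (PySem.List.pyGet? chunkLens ((chunkIdx + k : Nat) : Int)).getD 0) 0

-- B's single fused loop: chunk_idx into chunk_lens, pos into ybies
def pvAltLoop (ybies : List String) (chunkLens : List Nat) (cuts : List (List String)) (chunkIdx pos : Nat) : List String :=
  match cuts with
  | [] => []
  | c :: rest =>
      let n : Nat := if c.length = 0 then 1 else c.length
      let width : Nat := pvWidth chunkLens chunkIdx n
      PySem.Str.join "" (PySem.List.slice ybies (some (pos : Int)) (some ((pos : Int) + (width : Int))))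
        :: pvAltLoop ybies chunkLens rest (chunkIdx + n) (pos + width)

def rebuild_sentences_from_bies_alt (ybies : List String) (sents_cut_max : List (List String)) (cuts_in_sents : List (List String)) : List String :=
  pvAltLoop ybies (sents_cut_max.map List.length) cuts_in_sents 0 0

-- ===== PRECONDITION & SPEC =====
-- Pre_ excludes exactly the inputs on which A raises IndexError: cuts_in_sents demanding
-- more chunks (one for a line with no cuts, cuts_num otherwise) than sents_cut_max provides.
def Pre_rebuild_sentences_from_bies (ybies : List String) (sents_cut_max : List (List String)) (cuts_in_sents : List (List String)) : Prop :=
  (cuts_in_sents.map (fun c => max 1 c.length)).sum <= sents_cut_max.length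

instance (ybies : List String) (sents_cut_max : List (List String)) (cuts_in_sents : List (List String)) : Decidable (Pre_rebuild_sentences_from_bies ybies sents_cut_max cuts_in_sents) := by
  unfold Pre_rebuild_sentences_from_bies; infer_instance

def pvWitness_rebuild_sentences_from_bies : List String × List (List String) × List (List String) :=
  (["ab", "cd", "e"], [["x"], ["y", "z"], ["w"], ["u"], ["v"]], [[], ["p", "q"]])

def Spec_rebuild_sentences_from_bies (ybies : List String) (sents_cut_max : List (List String)) (cuts_in_sents : List (List String)) (out : List String) : Prop := out = rebuild_sentences_from_bies_alt ybies sents_cut_max cuts_in_sents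
instance (ybies : List String) (sents_cut_max : List (List String)) (cuts_in_sents : List (List String)) (out : List String) : Decidable (Spec_rebuild_sentences_from_bies ybies sents_cut_max cuts_in_sents out) := by unfold Spec_rebuild_sentences_from_bies; infer_instance

-- ===== CLAIM (what is proved, stated in full; the proofs are below) =====
def Claim_equal_rebuild_sentences_from_bies : Prop := ∀ (ybies : List String) (sents_cut_max : List (List String)) (cuts_in_sents : List (List String)), Dom_rebuild_sentences_from_bies ybies sents_cut_max cuts_in_sents → Pre_rebuild_sentences_from_bies ybies sents_cut_max cuts_in_sents → Spec_rebuild_sentences_from_bies ybies sents_cut_max cuts_in_sents (rebuild_sentences_from_bies ybies sents_cut_max cuts_in_sents)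

-- ===== LEMMAS AND PROOFS =====

theorem pvJoinE (L : List (List Char)) : PySem.Chars.join [] L = L.flatten := by
  simp only [PySem.Chars.join, List.intercalate]
  induction L with
  | nil => rfl
  | cons a t ih =>
      cases t with
      | nil => simp [List.intersperse]
      | cons b u => simp_all [List.intersperse]

theorem pvJoinS (L : List String) : (PySem.Str.join "" L).toList = (L.map String.toList).flatten := by
  rw [PySem.Str.toList_join]; exact pvJoinE _

theorem pvBuild_drop (ybies : List String) (lens : List Nat) (a k : Nat) :
    (pvBuild ybies lens a).drop k = pvBuild ybies (lens.drop k) (a + (lens.take k).sum) := by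
  induction k generalizing lens a with
  | zero => simp
  | succ k ih =>
      cases lens with
      | nil => simp [pvBuild]
      | cons v rest =>
          simp only [pvBuild, List.drop_succ_cons, List.take_succ_cons, List.sum_cons]
          rw [ih]
          ring_nf

theorem pvInner_shift (S : List String) (a n : Nat) :
    pvInner S a n = pvInner (S.drop a) 0 n := by
  unfold pvInner
  refine List.map_congr_left (fun j _ => ?_)
  rw [PySem.List.pyGet?_natCast, PySem.List.pyGet?_natCast, Nat.zero_add, List.getElem?_drop]

theorem pvGroup (ybies : List String) (lens : List Nat) (pos n : Nat) :
    PySem.Str.join "" (pvInner (pvBuild ybies lens pos) 0 n)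
      = PySem.Str.join "" ((ybies.drop pos).take ((lens.take n).sum)) := by
  induction lens generalizing pos n with
  | nil =>
      apply String.toList_inj.mp
      rw [pvJoinS, pvJoinS]
      simp [pvInner, pvBuild, PySem.List.pyGet?_natCast]
  | cons v rest ih =>
      cases n with
      | zero => rfl
      | succ m =>
          apply String.toList_inj.mp
          have ihm := congrArg String.toList (ih (pos + v) m)
          rw [pvJoinS, pvJoinS] at ihm ⊢
          have hrange : List.range (m + 1) = 0 :: (List.range m).map Nat.succ :=
            List.range_succ_eq_map
          have hhead : pvInner (pvBuild ybies (v :: rest) pos) 0 (m + 1)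
              = PySem.Str.join "" (PySem.List.slice ybies (some (pos : Int)) (some ((pos : Int) + (v : Int))))
                :: pvInner (pvBuild ybies rest (pos + v)) 0 m := by
            unfold pvInner
            rw [hrange]
            simp [pvBuild, PySem.List.pyGet?_natCast, Nat.succ_eq_add_one]
          rw [hhead]
          simp only [List.map_cons, List.flatten_cons]
          rw [ihm]
          rw [List.take_succ_cons, List.sum_cons, pvJoinS]
          rw [PySem.List.slice_natCast_add]
          rw [List.take_add, List.map_append, List.flatten_append, List.drop_drop]

theorem pvSingle (S : List String) (a : Nat) :
    (PySem.List.pyGet? S ((a : Nat) : Int)).getD "" = PySem.Str.join "" (pvInner S a 1) := by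
  apply String.toList_inj.mp
  rw [pvJoinS]
  simp [pvInner]

theorem pvWidth_eq (lens : List Nat) (ci n : Nat) (h : ci + n ≤ lens.length) :
    pvWidth lens ci n = ((lens.drop ci).take n).sum := by
  induction n with
  | zero => simp [pvWidth]
  | succ m ih =>
      unfold pvWidth at ih ⊢
      have hm : ci + m < lens.length := by omega
      rw [List.range_succ, List.foldl_append, ih (by omega)]
      simp only [List.foldl_cons, List.foldl_nil, PySem.List.pyGet?_natCast]
      rw [List.getElem?_eq_getElem hm, Option.getD_some, List.take_add_one, List.sum_append]
      simp [List.getElem?_drop, List.getElem?_eq_getElem hm]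

theorem pvMain (ybies : List String) (lens : List Nat) (cuts : List (List String)) (accum : Nat)
    (h : accum + (cuts.map (fun c => max 1 c.length)).sum ≤ lens.length) :
    pvRegroup (pvBuild ybies lens 0) cuts accum
      = pvAltLoop ybies lens cuts accum ((lens.take accum).sum) := by
  induction cuts generalizing accum with
  | nil => rfl
  | cons c rest ih =>
      have hsum : accum + max 1 c.length + (rest.map (fun c => max 1 c.length)).sum ≤ lens.length := by
        simp only [List.map_cons, List.sum_cons] at h; omega
      have hdropS : (pvBuild ybies lens 0).drop accum = pvBuild ybies (lens.drop accum) ((lens.take accum).sum) := by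
        rw [pvBuild_drop]; ring_nf
      have key : ∀ m : Nat, accum + m ≤ lens.length →
          PySem.Str.join "" (pvInner (pvBuild ybies lens 0) accum m)
            = PySem.Str.join "" (PySem.List.slice ybies (some (((lens.take accum).sum : Nat) : Int))
                (some ((((lens.take accum).sum : Nat) : Int) + ((pvWidth lens accum m : Nat) : Int)))) := by
        intro m hm
        rw [pvWidth_eq lens accum m hm, pvInner_shift, hdropS, pvGroup, PySem.List.slice_natCast_add]
      have htail : ∀ n : Nat, accum + n + (rest.map (fun c => max 1 c.length)).sum ≤ lens.length →
          pvRegroup (pvBuild ybies lens 0) rest (accum + n)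
            = pvAltLoop ybies lens rest (accum + n) ((lens.take accum).sum + pvWidth lens accum n) := by
        intro n hn
        rw [ih (accum + n) (by omega), List.take_add, List.sum_append,
          pvWidth_eq lens accum n (by omega)]
      by_cases hc : c.length = 0
      · simp only [pvRegroup, pvAltLoop, hc, reduceIte]
        refine List.cons_eq_cons.mpr ⟨?_, ?_⟩
        · rw [pvSingle]
          exact_mod_cast key 1 (by omega)
        · exact_mod_cast htail 1 (by simp only [hc] at hsum; omega)
      · have hcl : max 1 c.length = c.length := by omega
        simp only [pvRegroup, pvAltLoop, if_neg hc]
        exact List.cons_eq_cons.mpr ⟨key c.length (by omega), htail c.length (by omega)⟩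

-- ===== VERDICT (by name: the statement is the Claim_ definition above) =====
theorem rebuild_sentences_from_bies_spec : Claim_equal_rebuild_sentences_from_bies := by
  intro ybies scm cis _ hpre
  unfold Spec_rebuild_sentences_from_bies rebuild_sentences_from_bies rebuild_sentences_from_bies_alt
  have h : 0 + (cis.map (fun c => max 1 c.length)).sum ≤ (scm.map List.length).length := by
    simpa using hpre
  simpa using pvMain ybies (scm.map List.length) cis 0 h
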